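-- pv_equiv track=rewrite | github.com/sediusocialbucuresti/obscura | tools/b2b_official_source_ingest.py | is_role_email
-- ===== SOURCE A (Python) =====
-- def is_role_email(email: str) -> bool:
--     local = email.split("@", 1)[0].lower()
--     role_prefixes = (
--         "info",
--         "sales",
--         "export",
--         "commercial",
--         "contact",
--         "office",
--         "admin",
--         "orders",
--         "order",
--         "support",
--         "service",
--         "customerservice",
--         "kundeservice",
--         "firmapost",
--         "post",
--         "mail",
--         "hello",
--     )
--     return local in role_prefixes or any(local.startswith(f"{prefix}.") for prefix in role_prefixes)
-- ===== SOURCE B (Python) =====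
-- ROLE_PREFIXES = frozenset((
--     "info", "sales", "export", "commercial", "contact", "office", "admin",
--     "orders", "order", "support", "service", "customerservice",
--     "kundeservice", "firmapost", "post", "mail", "hello",
-- ))
--
--
-- def is_role_email(email: str) -> bool:
--     # Scan characters once: the leading dot-separated label of the local part
--     # is exactly the run of characters before the first '@' or '.'.
--     label_chars = []
--     for ch in email:
--         if ch == '@' or ch == '.':
--             break
--         label_chars.append(ch.lower())
--     return ''.join(label_chars) in ROLE_PREFIXES
-- ===== Notes on version B (the rewrite author's own statement) =====
-- stated objective: alternative
-- what changed: Instead of splitting the address and scanning every role prefix with an exact-match-or-startswith test, B makes a single character scan that collects the lowercased leading label (stopping at the first '@' or '.') and does one set membership test on that canonical key; it trades A's one-line prefix scan for an explicit O(n) loop.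
import Mathlib
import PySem

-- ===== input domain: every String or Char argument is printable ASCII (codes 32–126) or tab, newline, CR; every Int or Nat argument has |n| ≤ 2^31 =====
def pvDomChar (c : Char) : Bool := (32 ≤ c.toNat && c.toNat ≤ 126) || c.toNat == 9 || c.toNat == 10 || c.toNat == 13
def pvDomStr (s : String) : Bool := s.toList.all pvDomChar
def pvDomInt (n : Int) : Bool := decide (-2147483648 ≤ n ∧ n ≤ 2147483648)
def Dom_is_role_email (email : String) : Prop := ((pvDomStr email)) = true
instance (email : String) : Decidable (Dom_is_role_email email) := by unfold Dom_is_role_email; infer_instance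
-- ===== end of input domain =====

-- B replaces the split-then-(membership OR startswith-scan) shape with a single character
-- scan that collects the lowercased leading label (stopping at '@' or '.') and one set
-- membership test on it (objective: alternative decomposition).


-- ===== PORT A =====
-- the tuple `role_prefixes` of A
def rolePrefixesA : List String :=
  ["info", "sales", "export", "commercial", "contact", "office", "admin",
   "orders", "order", "support", "service", "customerservice",
   "kundeservice", "firmapost", "post", "mail", "hello"]

def is_role_email (email : String) : Bool :=
  -- email.split("@", 1)[0]: split on a nonempty separator always yields a nonempty
  -- list, so the [0] index never raises; its value is pyGet?'s `some` payload.
  let locl := PySem.Str.lower ((PySem.List.pyGet? ((PySem.Str.splitMax? email "@" 1).getD []) 0).getD "")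
  rolePrefixesA.contains locl
    || rolePrefixesA.any (fun prefx => PySem.Str.startswith locl (prefx ++ "."))

-- ===== PORT B =====
-- the frozenset ROLE_PREFIXES of B
def rolePrefixSetB : PySem.Set String :=
  PySem.Set.ofList
    ["info", "sales", "export", "commercial", "contact", "office", "admin",
     "orders", "order", "support", "service", "customerservice",
     "kundeservice", "firmapost", "post", "mail", "hello"]

-- B's for-loop with its break: collect lowercased characters until '@' or '.'
def collectLabel : List Char → List Char
  | [] => []
  | c :: rest =>
    if c = '@' || c = '.' then []
    else PySem.Chars.lowerChar c :: collectLabel rest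

def is_role_email_alt (email : String) : Bool :=
  PySem.Set.contains rolePrefixSetB (String.ofList (collectLabel email.toList))

-- ===== PRECONDITION & SPEC =====
def Spec_is_role_email (email : String) (out : Bool) : Prop := out = is_role_email_alt email
instance (email : String) (out : Bool) : Decidable (Spec_is_role_email email out) := by unfold Spec_is_role_email; infer_instance

-- ===== CLAIM (what is proved, stated in full; the proofs are below) =====
def Claim_equal_is_role_email : Prop := ∀ (email : String), Dom_is_role_email email → Spec_is_role_email email (is_role_email email)

-- ===== LEMMAS AND PROOFS =====

theorem go_acc (s : Char) (fuel m : Nat) (l cur : List Char) (acc : List (List Char)) :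
    ∃ ys, PySem.Chars.splitOnMax.go [s] fuel m l cur acc = acc.reverse ++ ys ∧ ys ≠ [] := by
  induction fuel generalizing m l cur acc with
  | zero => exact ⟨[cur.reverse ++ l], by simp [PySem.Chars.splitOnMax.go]⟩
  | succ fuel ih =>
    cases l with
    | nil => exact ⟨[cur.reverse], by simp [PySem.Chars.splitOnMax.go]⟩
    | cons c rest =>
      by_cases hm : m = 0
      · exact ⟨[cur.reverse ++ (c :: rest)], by simp [PySem.Chars.splitOnMax.go, hm]⟩
      · by_cases hc : c = s
        · obtain ⟨ys, hys, hne⟩ := ih (m-1) rest [] (cur.reverse :: acc)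
          refine ⟨cur.reverse :: ys, ?_, by simp⟩
          simp [PySem.Chars.splitOnMax.go, hm, hc, List.isPrefixOf] at hys ⊢
          simp [hys]
        · obtain ⟨ys, hys, hne⟩ := ih m rest (c :: cur) acc
          refine ⟨ys, ?_, hne⟩
          simp [PySem.Chars.splitOnMax.go, hm, List.isPrefixOf, Ne.symm hc, hys]

theorem go_head (s : Char) (fuel : Nat) (l cur : List Char) (h : l.length < fuel) :
    (PySem.Chars.splitOnMax.go [s] fuel 1 l cur []).headD [] =
      cur.reverse ++ l.takeWhile (· ≠ s) := by
  induction fuel generalizing l cur with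
  | zero => omega
  | succ fuel ih =>
    cases l with
    | nil => simp [PySem.Chars.splitOnMax.go]
    | cons c rest =>
      by_cases hc : c = s
      · obtain ⟨ys, hys, hne⟩ := go_acc s fuel 0 rest [] [cur.reverse]
        simp [PySem.Chars.splitOnMax.go, List.isPrefixOf, hc, hys, List.takeWhile]
      · have h2 := ih rest (c :: cur) (by simp at h; omega)
        simp [PySem.Chars.splitOnMax.go, List.isPrefixOf, Ne.symm hc, hc]
        simpa using h2

theorem splitMax_head (s : Char) (l : String) :
    (PySem.List.pyGet? ((PySem.Str.splitMax? l (String.ofList [s]) 1).getD []) 0).getD "" =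
      String.ofList (l.toList.takeWhile (· ≠ s)) := by
  obtain ⟨ys, hys, hne⟩ := go_acc s (l.toList.length+1) 1 l.toList [] []
  have hh := go_head s (l.toList.length+1) l.toList [] (by omega)
  rw [hys] at hh
  cases ys with
  | nil => exact absurd rfl hne
  | cons t ts =>
    simp at hh hys
    simp only [PySem.Str.splitMax?, PySem.Chars.splitMax?, PySem.Chars.splitOnMax,
      PySem.List.pyGet?, PySem.List.pyIdx?]
    simp [hys, hh]

theorem setB_eq : rolePrefixSetB = rolePrefixesA := by decide

theorem roles_no_dot : ∀ p ∈ rolePrefixesA, '.' ∉ p.toList := by decide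

theorem prefix_dot_eq (a b r : List Char) (ha : '.' ∉ a) (hb : '.' ∉ b)
    (h : (a ++ ['.']) <+: (b ++ '.' :: r)) : a = b := by
  induction a generalizing b with
  | nil =>
    cases b with
    | nil => rfl
    | cons y b' =>
      simp [List.cons_prefix_cons] at h hb
      exact absurd h hb.1
  | cons x a' ih =>
    cases b with
    | nil =>
      simp [List.cons_prefix_cons] at h ha
      exact absurd h.1.symm ha.1
    | cons y b' =>
      simp only [List.cons_append, List.cons_prefix_cons] at h
      simp only [List.mem_cons, not_or] at ha hb
      rw [h.1, ih b' ha.2 hb.2 h.2]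

theorem dropWhile_head_false {α : Type} (p : α → Bool) (l : List α) (c : α) (r : List α)
    (h : l.dropWhile p = c :: r) : p c = false := by
  induction l with
  | nil => simp at h
  | cons x xs ih =>
    by_cases hx : p x
    · exact ih (by simpa [List.dropWhile, hx] using h)
    · simp [List.dropWhile, hx] at h
      rw [← h.1]
      simpa using hx

theorem tail_eq (l : String) :
    (rolePrefixesA.contains l
      || rolePrefixesA.any (fun prefx => PySem.Str.startswith l (prefx ++ "."))) =
    PySem.Set.contains rolePrefixSetB (String.ofList (l.toList.takeWhile (· ≠ '.'))) := by
  rw [setB_eq]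
  rw [Bool.eq_iff_iff]
  simp only [PySem.Set.contains, Bool.or_eq_true, List.any_eq_true, List.contains_iff_mem,
    PySem.Str.startswith_eq, PySem.Chars.startswith_iff, ne_eq]
  have hsplit := List.takeWhile_append_dropWhile (p := fun c => decide ¬c = '.') (l := l.toList)
  cases hd : l.toList.dropWhile (fun c => decide ¬c = '.') with
  | nil =>
    rw [hd, List.append_nil] at hsplit
    constructor
    · rintro (hmem | ⟨p, hp, hpre⟩)
      · rw [hsplit]
        simpa using hmem
      · exfalso
        have hdot : '.' ∈ l.toList := hpre.subset (by simp)
        have := List.mem_takeWhile_imp (l := l.toList) (p := fun c => decide ¬c = '.')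
          (by rw [hsplit]; exact hdot)
        simp at this
    · intro hmem
      left
      rw [hsplit] at hmem
      simpa using hmem
  | cons c r =>
    rw [hd] at hsplit
    have hc : c = '.' := by
      have := dropWhile_head_false _ _ _ _ hd
      simpa using this
    subst hc
    have htdot : '.' ∉ l.toList.takeWhile (fun c => decide ¬c = '.') := by
      intro hm
      have := List.mem_takeWhile_imp hm
      simp at this
    constructor
    · rintro (hmem | ⟨p, hp, hpre⟩)
      · exfalso
        apply roles_no_dot l hmem
        rw [← hsplit] at *
        exact List.mem_append.mpr (Or.inr (by simp))
      · have hpd := roles_no_dot p hp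
        have hpre' : p.toList ++ ['.'] <+: l.toList.takeWhile (fun c => decide ¬c = '.') ++ '.' :: r := by
          rw [hsplit]
          simpa using hpre
        have heq := prefix_dot_eq _ _ r hpd htdot hpre'
        have hpeq : p = String.ofList (l.toList.takeWhile (fun c => decide ¬c = '.')) := by
          rw [← heq]; simp
        rw [← hpeq]
        exact hp
    · intro hmem
      right
      refine ⟨String.ofList (l.toList.takeWhile (fun c => decide ¬c = '.')), hmem, ?_⟩
      have hto : (String.ofList (l.toList.takeWhile (fun c => decide ¬c = '.')) ++ ".").toList
          = l.toList.takeWhile (fun c => decide ¬c = '.') ++ ['.'] := by simp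
      rw [hto]
      refine ⟨r, ?_⟩
      conv_rhs => rw [← hsplit]
      simp

-- lowerChar maps no character to a character below 'A' (it only turns 'A'..'Z' into 'a'..'z')
theorem lowerChar_eq_iff (c d : Char) (hd : d.toNat < 65) :
    PySem.Chars.lowerChar c = d ↔ c = d := by
  unfold PySem.Chars.lowerChar
  split_ifs with hu
  · have h12 : 65 ≤ c.toNat ∧ c.toNat ≤ 90 := by
      unfold PySem.Chars.isupper at hu
      simp only [Bool.and_eq_true, decide_eq_true_eq] at hu
      have h1 := hu.1; have h2 := hu.2
      rw [Char.le_def] at h1 h2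
      exact ⟨h1, h2⟩
    have hv : (Char.ofNat (c.toNat + 32)).toNat = c.toNat + 32 := by
      rw [Char.toNat_ofNat]
      have hval : (c.toNat + 32).isValidChar := Or.inl (by omega)
      simp [hval]
    constructor
    · intro h; exfalso
      have := congrArg Char.toNat h
      rw [hv] at this
      omega
    · intro h; exfalso
      have := congrArg Char.toNat h
      omega
  · exact Iff.rfl

-- B's scan = lowercasing the (dot-then-at-truncated) leading label
theorem collect_eq (l : List Char) :
    collectLabel l = PySem.Chars.lower ((l.takeWhile (· ≠ '@')).takeWhile (· ≠ '.')) := by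
  induction l with
  | nil => simp [collectLabel, PySem.Chars.lower]
  | cons c rest ih =>
    by_cases hc : c = '@' ∨ c = '.'
    · rcases hc with hc | hc <;> subst hc <;>
        simp [collectLabel, List.takeWhile, PySem.Chars.lower]
    · push Not at hc
      simp [collectLabel, hc.1, hc.2, List.takeWhile, PySem.Chars.lower] at ih ⊢
      exact ih

-- takeWhile (≠ '.') commutes with lowercasing
theorem takeWhile_lower (t : List Char) :
    (PySem.Chars.lower t).takeWhile (· ≠ '.') = PySem.Chars.lower (t.takeWhile (· ≠ '.')) := by
  unfold PySem.Chars.lower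
  rw [List.takeWhile_map]
  have hp : ((fun x => decide (x ≠ '.')) ∘ PySem.Chars.lowerChar)
      = (fun c : Char => decide (c ≠ '.')) := by
    funext c
    simp [Function.comp, lowerChar_eq_iff c '.' (by decide)]
  rw [hp]

-- ===== VERDICT (by name: the statement is the Claim_ definition above) =====
theorem is_role_email_spec : Claim_equal_is_role_email := by
  intro email _
  unfold Spec_is_role_email
  have hB : is_role_email_alt email
      = PySem.Set.contains rolePrefixSetB (String.ofList (collectLabel email.toList)) := rfl
  have hA : is_role_email email
      = (rolePrefixesA.contains (PySem.Str.lower (String.ofList (email.toList.takeWhile (· ≠ '@'))))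
        || rolePrefixesA.any (fun prefx => PySem.Str.startswith (PySem.Str.lower (String.ofList (email.toList.takeWhile (· ≠ '@')))) (prefx ++ "."))) := by
    unfold is_role_email
    rw [show ("@" : String) = String.ofList ['@'] from rfl, splitMax_head '@' email]
  rw [hA, hB, tail_eq]
  have hL : (PySem.Str.lower (String.ofList (email.toList.takeWhile (· ≠ '@')))).toList.takeWhile (· ≠ '.')
      = collectLabel email.toList := by
    rw [show (PySem.Str.lower (String.ofList (email.toList.takeWhile (· ≠ '@')))).toList
        = PySem.Chars.lower (email.toList.takeWhile (· ≠ '@')) by simp]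
    rw [takeWhile_lower, collect_eq]
  rw [hL]
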